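-- pv_equiv track=rewrite | github.com/lipakkey/- | app/desktop/controllers/report_controller.py | _fallback_per_device
-- ===== SOURCE A (Python) =====
-- def _fallback_per_device(data: dict) -> dict[str, int]:
--     result: dict[str, int] = {}
--     for entry in data.get("entries", []):
--         device = entry.get("device_id")
--         if not device:
--             continue
--         result[device] = result.get(device, 0) + 1
--     return result
-- ===== SOURCE B (Python) =====
-- def _fallback_per_device(data: dict) -> dict[str, int]:
--     ids = [e.get("device_id") for e in data.get("entries", []) if e.get("device_id")]
--     return {d: ids.count(d) for d in dict.fromkeys(ids)}
-- ===== Notes on version B (the rewrite author's own statement) =====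
-- stated objective: alternative
-- what changed: A accumulates a running count dict in one pass; B first extracts the filtered list of device ids, then builds the result from its ordered-deduplicated ids with list.count per id.
import Mathlib
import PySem

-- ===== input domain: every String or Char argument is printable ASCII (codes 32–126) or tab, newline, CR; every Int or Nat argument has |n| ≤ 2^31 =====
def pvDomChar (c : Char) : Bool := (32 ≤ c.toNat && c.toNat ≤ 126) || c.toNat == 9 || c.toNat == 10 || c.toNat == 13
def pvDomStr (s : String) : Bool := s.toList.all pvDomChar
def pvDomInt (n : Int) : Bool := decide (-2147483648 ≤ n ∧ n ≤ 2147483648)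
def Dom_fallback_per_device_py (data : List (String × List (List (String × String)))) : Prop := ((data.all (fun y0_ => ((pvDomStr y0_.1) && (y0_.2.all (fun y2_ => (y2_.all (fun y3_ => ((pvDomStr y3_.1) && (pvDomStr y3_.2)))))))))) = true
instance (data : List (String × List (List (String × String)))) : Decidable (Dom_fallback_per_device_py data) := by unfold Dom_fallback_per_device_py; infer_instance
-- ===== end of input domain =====

-- B replaces A's single accumulating counter-dict pass by extract-ids / ordered-dedup / count-per-id (alternative decomposition, same results).

-- ===== PORT A =====
-- one pass: a running dict of counts, skipping entries whose device_id is missing or falsy ("")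
def fallback_per_device_py (data : List (String × List (List (String × String)))) : List (String × Int) :=
  (((PySem.Dict.mk data).getD "entries" []).foldl
    (fun (result : PySem.Dict String Int) entry =>
      match (PySem.Dict.mk entry).get? "device_id" with
      | none => result
      | some device =>
        if device = "" then result
        else result.insert device (result.getD device 0 + 1))
    PySem.Dict.empty).items

-- ===== PORT B =====
-- the truthy device ids, in entry order (list comprehension with the same filter)
def pvIds (entries : List (List (String × String))) : List String :=
  entries.filterMap (fun e =>
    match (PySem.Dict.mk e).get? "device_id" with
    | none => none
    | some d => if d = "" then none else some d)

def fallback_per_device_py_alt (data : List (String × List (List (String × String)))) : List (String × Int) :=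
  let ids := pvIds ((PySem.Dict.mk data).getD "entries" [])
  (PySem.List.dedup ids).map (fun d => (d, PySem.List.count ids d))

-- ===== PRECONDITION & SPEC =====
def Spec_fallback_per_device_py (data : List (String × List (List (String × String)))) (out : List (String × Int)) : Prop := out = fallback_per_device_py_alt data
instance (data : List (String × List (List (String × String)))) (out : List (String × Int)) : Decidable (Spec_fallback_per_device_py data out) := by unfold Spec_fallback_per_device_py; infer_instance

-- ===== CLAIM (what is proved, stated in full; the proofs are below) =====
def Claim_equal_fallback_per_device_py : Prop := ∀ (data : List (String × List (List (String × String)))), Dom_fallback_per_device_py data → Spec_fallback_per_device_py data (fallback_per_device_py data)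

-- ===== LEMMAS AND PROOFS =====

-- A's guarded fold over entries is the counter fold over the extracted ids
theorem foldA_eq_foldl_ids (entries : List (List (String × String)))
    (d : PySem.Dict String Int) :
    entries.foldl
      (fun (result : PySem.Dict String Int) entry =>
        match (PySem.Dict.mk entry).get? "device_id" with
        | none => result
        | some device =>
          if device = "" then result
          else result.insert device (result.getD device 0 + 1))
      d
    = (pvIds entries).foldl (fun r x => r.insert x (r.getD x 0 + 1)) d := by
  induction entries generalizing d with
  | nil => rfl
  | cons e es ih =>
    simp only [pvIds, List.filterMap_cons, List.foldl_cons]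
    cases h : (PySem.Dict.mk e).get? "device_id" with
    | none => simpa [pvIds] using ih d
    | some v =>
      by_cases hv : v = "" <;> simp [hv] <;> apply ih

-- ===== VERDICT (by name: the statement is the Claim_ definition above) =====
theorem fallback_per_device_py_spec : Claim_equal_fallback_per_device_py := by
  intro data _
  show _ = _
  unfold fallback_per_device_py fallback_per_device_py_alt
  rw [foldA_eq_foldl_ids, PySem.Dict.foldl_insert_getD_add_one_eq_counter,
    PySem.Dict.items_counter]
  simp only [PySem.List.dedup_eq_ofList, PySem.List.count_eq]
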